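-- pv_equiv track=rewrite | github.com/keshavganapathy/w2s | evaluate.py | best_of_n
-- ===== SOURCE A (Python) =====
-- def best_of_n(model_answers):
--     answer_counts = {}
--     for ans in model_answers:
--         if ans is not None:
--             answer_counts[ans] = answer_counts.get(ans, 0) +1
--
--
--     if answer_counts:
--         # Get the majority answer
--         best_of_n = max(answer_counts.items(), key=lambda x: x[1])[0]
--     else:
--         best_of_n = None
--
--     return best_of_n
-- ===== SOURCE B (Python) =====
-- def best_of_n(model_answers):
--     def mode(xs):
--         # returns (most common element or None, its count), ties to earliest element
--         if not xs:
--             return (None, 0)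
--         x = xs[0]
--         c = xs.count(x)
--         rest = [y for y in xs if y != x]
--         m, mc = mode(rest)
--         return (x, c) if c >= mc else (m, mc)
--     return mode([a for a in model_answers if a is not None])[0]
-- ===== Notes on version B (the rewrite author's own statement) =====
-- stated objective: alternative
-- what changed: Replaces A's single-pass dict frequency accumulation followed by max over items with a recursive partition-and-recurse mode: count the head of the filtered list, remove all its occurrences, recurse on the remainder, and keep the head on ties (head is earliest-seen, matching A's first-max tie-break).
import Mathlib
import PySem

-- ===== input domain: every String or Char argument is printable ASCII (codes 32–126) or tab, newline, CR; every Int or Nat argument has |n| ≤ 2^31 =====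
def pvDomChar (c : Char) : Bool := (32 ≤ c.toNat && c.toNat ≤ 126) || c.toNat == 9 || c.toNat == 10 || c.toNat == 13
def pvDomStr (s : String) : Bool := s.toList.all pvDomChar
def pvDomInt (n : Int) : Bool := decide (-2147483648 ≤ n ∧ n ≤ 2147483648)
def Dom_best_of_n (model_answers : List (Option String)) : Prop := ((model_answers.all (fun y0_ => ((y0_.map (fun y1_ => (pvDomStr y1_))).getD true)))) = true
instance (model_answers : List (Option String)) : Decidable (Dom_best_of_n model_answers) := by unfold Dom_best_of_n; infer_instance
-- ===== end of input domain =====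

-- B replaces A's dict frequency accumulation + max over items with a recursive
-- partition-and-recurse mode (count the head, remove all its occurrences, recurse,
-- keep the head on ties); same return value, alternative algorithm.

-- ===== PORT A =====
def best_of_n (model_answers : List (Option String)) : Option String :=
  let answer_counts : PySem.Dict String Int :=
    model_answers.foldl
      (fun d ans =>
        match ans with
        | some a => d.insert a (d.getD a 0 + 1)
        | none => d)
      PySem.Dict.empty
  if answer_counts.items ≠ [] then
    (PySem.List.max? answer_counts.items (fun x => x.2)).map (fun x => x.1)
  else
    none

-- ===== PORT B =====
-- helper `mode` of Source B: head, its count, recurse on the list with all its occurrences removed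
def pvModeB : List String → Option String × Int
  | [] => (none, 0)
  | x :: t =>
    let c : Int := (PySem.List.count (x :: t) x : Int)
    let rest := (x :: t).filter (fun y => y != x)
    let r := pvModeB rest
    if r.2 ≤ c then (some x, c) else r
termination_by xs => xs.length
decreasing_by
  simp only [List.filter_cons, bne_self_eq_false, Bool.false_eq_true, if_false, List.length_cons]
  exact Nat.lt_succ_of_le (List.length_filter_le _ _)

def best_of_n_alt (model_answers : List (Option String)) : Option String :=
  (pvModeB (model_answers.filterMap (fun a => a))).1

-- ===== PRECONDITION & SPEC =====
def Spec_best_of_n (model_answers : List (Option String)) (out : Option String) : Prop := out = best_of_n_alt model_answers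
instance (model_answers : List (Option String)) (out : Option String) : Decidable (Spec_best_of_n model_answers out) := by unfold Spec_best_of_n; infer_instance

-- ===== CLAIM =====
def Claim_equal_best_of_n : Prop := ∀ (model_answers : List (Option String)), Dom_best_of_n model_answers → Spec_best_of_n model_answers (best_of_n model_answers)

-- ===== LEMMAS AND PROOFS =====

-- A's fold skipping None is the fold over the None-filtered list.
theorem pv_foldl_skip_none {γ : Type} (g : γ → String → γ) (xs : List (Option String)) (init : γ) :
    xs.foldl (fun d ans => match ans with | some a => g d a | none => d) init
      = (xs.filterMap (fun x => x)).foldl g init := by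
  induction xs generalizing init with
  | nil => rfl
  | cons x t ih =>
    cases x <;> simp [List.foldl, ih]

-- max? over a mapped list.
theorem pv_max?_map {α β κ : Type} [LT κ] [DecidableLT κ]
    (f : α → β) (key : β → κ) (xs : List α) :
    PySem.List.max? (xs.map f) key = (PySem.List.max? xs (fun x => key (f x))).map f := by
  unfold PySem.List.max?
  suffices h : ∀ (a : Option α),
      List.foldl (fun acc x => match acc with
        | none => some x
        | some m => if key m < key x then some x else some m) (a.map f) (xs.map f)
      = (List.foldl (fun acc x => match acc with
        | none => some x
        | some m => if key (f m) < key (f x) then some x else some m) a xs).map f by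
    simpa using h none
  induction xs with
  | nil => intro a; rfl
  | cons x t ih =>
    intro a
    cases a with
    | none => simpa using ih (some x)
    | some m =>
      by_cases h : key (f m) < key (f x)
      · simpa [h] using ih (some x)
      · simpa [h] using ih (some m)

-- max? with keys agreeing on the members of the list.
theorem pv_max?_congr {α κ : Type} [LT κ] [DecidableLT κ]
    (xs : List α) (k1 k2 : α → κ) (h : ∀ x ∈ xs, k1 x = k2 x) :
    PySem.List.max? xs k1 = PySem.List.max? xs k2 := by
  unfold PySem.List.max?
  suffices haux : ∀ (l : List α) (acc : Option α),
      (∀ x ∈ l, k1 x = k2 x) → (∀ a, acc = some a → k1 a = k2 a) →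
      List.foldl (fun acc x => match acc with
        | none => some x
        | some m => if k1 m < k1 x then some x else some m) acc l
      = List.foldl (fun acc x => match acc with
        | none => some x
        | some m => if k2 m < k2 x then some x else some m) acc l by
    exact haux xs none h (by simp)
  intro l
  induction l with
  | nil => intro acc _ _; rfl
  | cons y l' ih =>
    intro acc hl hacc
    have hy : k1 y = k2 y := hl y (by simp)
    have hl' : ∀ x ∈ l', k1 x = k2 x := fun x hx => hl x (by simp [hx])
    cases acc with
    | none =>
      simp only [List.foldl]
      exact ih (some y) hl' (by intro a ha; cases ha; exact hy)
    | some m =>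
      have hm : k1 m = k2 m := hacc m rfl
      simp only [List.foldl, hm, hy]
      split_ifs with hcmp
      · exact ih (some y) hl' (by intro a ha; cases ha; exact hy)
      · exact ih (some m) hl' (by intro a ha; cases ha; exact hm)

-- the running-max fold started at `some x` vs max? of the tail (first maximal wins).
theorem pv_foldl_some {α κ : Type} [LinearOrder κ] (key : α → κ) (l : List α) :
    ∀ (x : α),
      List.foldl (fun acc z => match acc with
        | none => some z
        | some m => if key m < key z then some z else some m) (some x) l
      = match List.foldl (fun acc z => match acc with
          | none => some z
          | some m => if key m < key z then some z else some m) none l with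
        | none => some x
        | some m => if key x < key m then some m else some x := by
  induction l with
  | nil => intro x; rfl
  | cons y l' ih =>
    intro x
    simp only [List.foldl]
    rw [ih y]
    by_cases hxy : key x < key y
    · rw [if_pos hxy, ih y]
      cases hm : List.foldl (fun acc z => match acc with
          | none => some z
          | some m => if key m < key z then some z else some m) none l' with
      | none => simp [hxy]
      | some m =>
        by_cases hym : key y < key m
        · have hxm : key x < key m := lt_trans hxy hym
          simp [hym, hxm]
        · simp [hym, hxy]
    · rw [if_neg hxy, ih x]
      cases hm : List.foldl (fun acc z => match acc with
          | none => some z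
          | some m => if key m < key z then some z else some m) none l' with
      | none => simp [hxy]
      | some m =>
        by_cases hym : key y < key m
        · simp [hym]
        · have hmy : key m ≤ key y := not_lt.mp hym
          have hyx : key y ≤ key x := not_lt.mp hxy
          have hxm : ¬ key x < key m := not_lt.mpr (le_trans hmy hyx)
          simp [hym, hxy, hxm]

-- unfolding max? on a cons cell (the earlier element wins ties).
theorem pv_max?_cons {α κ : Type} [LinearOrder κ] (x : α) (l : List α) (key : α → κ) :
    PySem.List.max? (x :: l) key
      = match PySem.List.max? l key with
        | none => some x
        | some m => if key x < key m then some m else some x := by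
  unfold PySem.List.max?
  simp only [List.foldl]
  exact pv_foldl_some key l x

-- folding Set.add over a tail filtered of an already-present element changes nothing.
theorem pv_ofList_filter {α : Type} [BEq α] [LawfulBEq α]
    (t : List α) (acc : PySem.Set α) (x : α) (hx : x ∈ acc) :
    List.foldl PySem.Set.add acc (t.filter (fun y => y != x))
      = List.foldl PySem.Set.add acc t := by
  induction t generalizing acc with
  | nil => rfl
  | cons y t' ih =>
    by_cases hyx : y = x
    · subst hyx
      have hc : PySem.Set.add acc y = acc := by
        unfold PySem.Set.add
        simp [PySem.Set.contains, hx]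
      simp only [List.filter_cons, bne_self_eq_false, Bool.false_eq_true, if_false, List.foldl, hc]
      exact ih acc hx
    · have hb : (y != x) = true := bne_iff_ne.mpr hyx
      simp only [List.filter_cons, hb, if_pos, List.foldl]
      have hx' : x ∈ PySem.Set.add acc y := by
        unfold PySem.Set.add
        split_ifs with h
        · exact hx
        · exact List.mem_append_left _ hx
      exact ih _ hx'

-- folding Set.add keeps a head no tail element equals.
theorem pv_foldl_add_cons_head {α : Type} [BEq α] [LawfulBEq α]
    (t : List α) (s : PySem.Set α) (x : α) (h : ∀ y ∈ t, y ≠ x) :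
    List.foldl PySem.Set.add (x :: s) t = x :: List.foldl PySem.Set.add s t := by
  induction t generalizing s with
  | nil => rfl
  | cons y t' ih =>
    have hyx : y ≠ x := h y (by simp)
    have hstep : PySem.Set.add (x :: s) y = x :: PySem.Set.add s y := by
      unfold PySem.Set.add
      have hcx : PySem.Set.contains (x :: s) y = PySem.Set.contains s y := by
        simp [PySem.Set.contains, hyx]
      rw [hcx]
      split_ifs with hc
      · rfl
      · rfl
    simp only [List.foldl, hstep]
    exact ih _ (fun y hy => h y (by simp [hy]))

-- dedup of a cons cell: the head, then dedup of the tail with the head removed.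
theorem pv_dedup_cons {α : Type} [BEq α] [LawfulBEq α] (x : α) (t : List α) :
    PySem.List.dedup (x :: t)
      = x :: PySem.List.dedup (t.filter (fun y => y != x)) := by
  unfold PySem.List.dedup PySem.Set.ofList
  have h0 : PySem.Set.add PySem.Set.empty x = (x :: PySem.Set.empty : List α) := rfl
  simp only [List.foldl, h0]
  rw [← pv_ofList_filter t (x :: PySem.Set.empty : List α) x (by simp [PySem.Set.empty])]
  exact pv_foldl_add_cons_head _ PySem.Set.empty x
    (fun y hy => bne_iff_ne.mp ((List.mem_filter.mp hy).2))

-- B's recursive mode computes the first count-maximal distinct element and its count.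
theorem pv_modeB_spec (xs : List String) :
    pvModeB xs
      = (PySem.List.max? (PySem.List.dedup xs) (fun k => (List.count k xs : Int)),
         match PySem.List.max? (PySem.List.dedup xs) (fun k => (List.count k xs : Int)) with
         | none => 0
         | some m => (List.count m xs : Int)) := by
  suffices H : ∀ (n : Nat) (ys : List String), ys.length ≤ n →
      pvModeB ys
        = (PySem.List.max? (PySem.List.dedup ys) (fun k => (List.count k ys : Int)),
           match PySem.List.max? (PySem.List.dedup ys) (fun k => (List.count k ys : Int)) with
           | none => 0
           | some m => (List.count m ys : Int)) by
    exact H xs.length xs le_rfl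
  intro n
  induction n with
  | zero =>
    intro ys hlen
    have hnil : ys = [] := List.length_eq_zero_iff.mp (Nat.le_zero.mp hlen)
    subst hnil
    simp [pvModeB, PySem.List.dedup, PySem.Set.ofList, PySem.Set.empty, PySem.List.max?]
  | succ n ih =>
    intro ys hlen
    match ys with
    | [] => simp [pvModeB, PySem.List.dedup, PySem.Set.ofList, PySem.Set.empty, PySem.List.max?]
    | x :: t =>
      have hF : (x :: t).filter (fun y => y != x) = t.filter (fun y => y != x) := by
        simp [List.filter_cons]
      have hlenF : (t.filter (fun y => y != x)).length ≤ n := by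
        have h1 := List.length_filter_le (fun y => y != x) t
        simp only [List.length_cons] at hlen
        omega
      have IH := ih _ hlenF
      have hkey : ∀ k ∈ PySem.List.dedup (t.filter (fun y => y != x)),
          ((List.count k (x :: t) : Nat) : Int) = ((List.count k (t.filter (fun y => y != x)) : Nat) : Int) := by
        intro k hk
        have hk' : k ∈ t.filter (fun y => y != x) := (PySem.List.mem_dedup _ _).mp hk
        have hkx : k ≠ x := bne_iff_ne.mp ((List.mem_filter.mp hk').2)
        have h1 : List.count k (x :: t) = List.count k t :=
          List.count_cons_of_ne (fun h => hkx h.symm)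
        have h2 : List.count k (t.filter (fun y => y != x)) = List.count k t :=
          List.count_filter (bne_iff_ne.mpr hkx)
        rw [h1, h2]
      have hcong : PySem.List.max? (PySem.List.dedup (t.filter (fun y => y != x)))
            (fun k => (List.count k (x :: t) : Int))
          = PySem.List.max? (PySem.List.dedup (t.filter (fun y => y != x)))
            (fun k => (List.count k (t.filter (fun y => y != x)) : Int)) :=
        pv_max?_congr _ _ _ hkey
      have hded := pv_dedup_cons x t
      have hRHS : PySem.List.max? (PySem.List.dedup (x :: t)) (fun k => (List.count k (x :: t) : Int))
          = match PySem.List.max? (PySem.List.dedup (t.filter (fun y => y != x)))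
              (fun k => (List.count k (t.filter (fun y => y != x)) : Int)) with
            | none => some x
            | some m => if (List.count x (x :: t) : Int) < (List.count m (x :: t) : Int)
                        then some m else some x := by
        rw [hded, pv_max?_cons, hcong]
        cases PySem.List.max? (PySem.List.dedup (t.filter (fun y => y != x)))
            (fun k => (List.count k (t.filter (fun y => y != x)) : Int)) with
        | none => rfl
        | some m => rfl
      rw [pvModeB]
      simp only [hF]
      rw [IH, hRHS]
      cases hm : PySem.List.max? (PySem.List.dedup (t.filter (fun y => y != x)))
          (fun k => (List.count k (t.filter (fun y => y != x)) : Int)) with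
      | none =>
        simp [PySem.List.count_eq]
        omega
      | some m =>
        have hme := hkey m (PySem.List.max?_mem hm)
        simp [PySem.List.count_eq]
        split_ifs with hA hB hB'
        · exfalso; omega
        · simp
        · simp [hme]
        · exfalso; omega

-- ===== VERDICT =====
theorem best_of_n_spec : Claim_equal_best_of_n := by
  intro ma _
  unfold Spec_best_of_n best_of_n best_of_n_alt
  rw [pv_foldl_skip_none]
  rw [PySem.Dict.foldl_insert_getD_add_one_eq_counter]
  simp only [PySem.Dict.items_counter]
  rw [pv_modeB_spec]
  by_cases h : List.filterMap (fun x : Option String => x) ma = []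
  · simp [h, PySem.List.dedup_eq_ofList, PySem.Set.ofList, PySem.Set.empty, PySem.List.max?]
  · have hne : PySem.List.dedup (List.filterMap (fun x : Option String => x) ma) ≠ [] := by
      intro hnil
      rcases List.exists_mem_of_ne_nil _ h with ⟨y, hy⟩
      have hym := (PySem.List.mem_dedup (List.filterMap (fun x : Option String => x) ma) y).mpr hy
      rw [hnil] at hym
      exact absurd hym (List.not_mem_nil)
    rw [← PySem.List.dedup_eq_ofList, pv_max?_map]
    rcases hx : PySem.List.max? (PySem.List.dedup (List.filterMap (fun x : Option String => x) ma))
        (fun k => (List.count k (List.filterMap (fun x : Option String => x) ma) : Int)) with _ | v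
    · exact absurd ((PySem.List.max?_eq_none_iff _ _).mp hx) hne
    · have hof : PySem.Set.ofList (List.filterMap (fun x : Option String => x) ma) ≠ [] := by
        rw [← PySem.List.dedup_eq_ofList]; exact hne
      simp [hx, hof, hne]
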